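-- pv_equiv track=rewrite | github.com/jiminchur/BaekjoonCodingTest | 백준/Silver/1141. 접두사/접두사.py | max_prefix_free_subset
-- ===== SOURCE A (Python) =====
-- def max_prefix_free_subset(words):
--     words = list(set(words))  # 중복 제거
--     words.sort()  # 사전 순 정렬
--
--     answer = 0
--     for i in range(len(words)):
--         is_prefix = False
--         for j in range(i + 1, len(words)):
--             if words[j].startswith(words[i]):
--                 is_prefix = True
--                 break
--         if not is_prefix:
--             answer += 1
--     return answer
-- ===== SOURCE B (Python) =====
-- def max_prefix_free_subset(words):
--     ws = sorted(set(words))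
--     if not ws:
--         return 0
--     return sum(1 for a, b in zip(ws, ws[1:]) if not b.startswith(a)) + 1
-- ===== Notes on version B (the rewrite author's own statement) =====
-- stated objective: faster
-- what changed: After sorting the deduplicated words, a word is a prefix of some later word iff it is a prefix of its immediate successor, so B compares each word only with its neighbour instead of scanning all later words.
import Mathlib
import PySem

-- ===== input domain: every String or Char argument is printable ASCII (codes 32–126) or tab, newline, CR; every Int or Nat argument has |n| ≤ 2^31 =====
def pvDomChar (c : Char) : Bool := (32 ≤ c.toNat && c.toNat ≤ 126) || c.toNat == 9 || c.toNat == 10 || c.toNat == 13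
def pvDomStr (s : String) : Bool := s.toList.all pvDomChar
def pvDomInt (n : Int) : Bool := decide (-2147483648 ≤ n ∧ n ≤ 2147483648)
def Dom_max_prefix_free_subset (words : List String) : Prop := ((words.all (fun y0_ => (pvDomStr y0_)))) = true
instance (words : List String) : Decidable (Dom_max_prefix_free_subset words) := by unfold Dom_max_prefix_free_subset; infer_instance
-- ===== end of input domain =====

-- B replaces A's scan of ALL later words by a single comparison with the immediate
-- successor of the sorted deduplicated list (valid because the list is sorted): asymptotically faster.

-- ===== PORT A =====
def max_prefix_free_subset (words : List String) : Int :=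
  let ws := PySem.List.sorted (PySem.Set.ofList words) (fun x => x)
  (PySem.List.pyRange 0 ws.length).foldl
    (fun answer i =>
      let is_prefix := (PySem.List.pyRange (i + 1) ws.length).any
        (fun j => PySem.Str.startswith (PySem.List.pyGetD ws j "") (PySem.List.pyGetD ws i ""))
      if is_prefix then answer else answer + 1) 0

-- ===== PORT B =====
def max_prefix_free_subset_alt (words : List String) : Int :=
  let ws := PySem.List.sorted (PySem.Set.ofList words) (fun x => x)
  if ws.isEmpty then 0
  else ((ws.zip ws.tail).countP (fun p => !PySem.Str.startswith p.2 p.1) : Int) + 1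

-- ===== PRECONDITION & SPEC =====
def Spec_max_prefix_free_subset (words : List String) (out : Int) : Prop := out = max_prefix_free_subset_alt words
instance (words : List String) (out : Int) : Decidable (Spec_max_prefix_free_subset words out) := by unfold Spec_max_prefix_free_subset; infer_instance

-- ===== CLAIM (what is proved, stated in full; the proofs are below) =====
def Claim_equal_max_prefix_free_subset : Prop := ∀ (words : List String), Dom_max_prefix_free_subset words → Spec_max_prefix_free_subset words (max_prefix_free_subset words)

-- ===== LEMMAS AND PROOFS =====

-- structural counter: number of words not a prefix of any LATER word
def pvCountFree : List String → Nat
  | [] => 0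
  | x :: t => (if t.any (fun y => PySem.Str.startswith y x) then 0 else 1) + pvCountFree t

-- a prefix of a lexicographically larger word is a prefix of everything in between
theorem pv_prefix_mono : ∀ (u v w : List Char), List.Lex (· < ·) u v → List.Lex (· < ·) v w →
    u <+: w → u <+: v := by
  intro u
  induction u with
  | nil => intro v w _ _ _; exact List.nil_prefix
  | cons a u' ih =>
    intro v w huv hvw hpw
    cases v with
    | nil => cases huv
    | cons b v' =>
      cases w with
      | nil => cases hvw
      | cons c w' =>
        obtain ⟨hac, hp'⟩ := List.cons_prefix_cons.mp hpw
        subst hac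
        cases huv with
        | rel hab =>
          cases hvw with
          | rel hba => exact absurd (lt_trans hab hba) (lt_irrefl a)
          | cons h' => exact absurd hab (lt_irrefl a)
        | cons h' =>
          cases hvw with
          | rel hba => exact absurd hba (lt_irrefl a)
          | cons h'' => exact List.cons_prefix_cons.mpr ⟨rfl, ih v' w' h' h'' hp'⟩

theorem pv_lex_of_lt {s t : String} (h : s < t) : List.Lex (· < ·) s.toList t.toList := by
  rw [String.lt_iff_toList_lt] at h
  exact (List.lt_iff_lex_lt _ _).mp h

-- on a strictly sorted list, "x is a prefix of some later word" = "x is a prefix of the next word"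
theorem pv_any_eq_head (x y : String) (t : List String)
    (hs : List.Pairwise (· < ·) (x :: y :: t)) :
    (y :: t).any (fun z => PySem.Str.startswith z x) = PySem.Str.startswith y x := by
  cases hb : PySem.Str.startswith y x with
  | true => simp only [List.any_cons, hb, Bool.true_or]
  | false =>
    simp only [List.any_cons, hb, Bool.false_or]
    by_contra hc
    rw [Bool.not_eq_false, List.any_eq_true] at hc
    obtain ⟨z, hz, hzs⟩ := hc
    have hxy : x < y := (List.pairwise_cons.mp hs).1 y (by simp)
    have hyz : y < z := (List.pairwise_cons.mp (List.pairwise_cons.mp hs).2).1 z hz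
    have hpref : x.toList <+: z.toList := by
      rw [PySem.Str.startswith_eq] at hzs
      exact (PySem.Chars.startswith_iff _ _).mp hzs
    have : x.toList <+: y.toList :=
      pv_prefix_mono _ _ _ (pv_lex_of_lt hxy) (pv_lex_of_lt hyz) hpref
    rw [PySem.Str.startswith_eq, (PySem.Chars.startswith_iff y.toList x.toList).mpr this] at hb
    exact Bool.noConfusion hb

-- sorted list: structural "free" count = adjacent-pair count + 1
theorem pv_countFree_eq_zip : ∀ (l : List String), List.Pairwise (· < ·) l → l ≠ [] →
    pvCountFree l = (l.zip l.tail).countP (fun p => !PySem.Str.startswith p.2 p.1) + 1 := by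
  intro l
  induction l with
  | nil => intro _ h; exact absurd rfl h
  | cons x t ih =>
    intro hs _
    cases t with
    | nil => simp [pvCountFree]
    | cons y t' =>
      have hrec := ih (List.pairwise_cons.mp hs).2 (by simp)
      simp only [pvCountFree, pv_any_eq_head x y t' hs, List.tail_cons, List.zip_cons_cons,
        List.countP_cons] at hrec ⊢
      rw [hrec]
      cases PySem.Str.startswith y x <;> simp <;> omega

-- A's index loop (as a countP over range) = the structural count
theorem pv_countP_range_eq : ∀ (l : List String),
    (List.range l.length).countP
      (fun k => !(l.drop (k + 1)).any (fun y => PySem.Str.startswith y (l.getD k ""))) =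
    pvCountFree l := by
  intro l
  induction l with
  | nil => simp [pvCountFree]
  | cons x t ih =>
    rw [List.length_cons, List.range_succ_eq_map, List.countP_cons, List.countP_map]
    have h0 : (((x :: t).drop (0 + 1)).any (fun y => PySem.Str.startswith y ((x :: t).getD 0 ""))) =
        t.any (fun y => PySem.Str.startswith y x) := by simp
    have hshift : (List.range t.length).countP
        ((fun k => !((x :: t).drop (k + 1)).any (fun y => PySem.Str.startswith y ((x :: t).getD k ""))) ∘ Nat.succ) =
        (List.range t.length).countP
        (fun k => !(t.drop (k + 1)).any (fun y => PySem.Str.startswith y (t.getD k ""))) := by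
      apply List.countP_congr
      intro k _
      simp [Function.comp]
    rw [hshift, ih, h0, pvCountFree]
    cases t.any (fun y => PySem.Str.startswith y x) <;> simp <;> omega

-- rewrite A's foldl into that countP over range
theorem pv_A_eq_countFree (l : List String) :
    (PySem.List.pyRange 0 l.length).foldl
      (fun answer i =>
        let is_prefix := (PySem.List.pyRange (i + 1) l.length).any
          (fun j => PySem.Str.startswith (PySem.List.pyGetD l j "") (PySem.List.pyGetD l i ""))
        if is_prefix then answer else answer + 1) 0 = (pvCountFree l : Int) := by
  have hfun : (fun (answer : Int) (i : Int) =>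
        let is_prefix := (PySem.List.pyRange (i + 1) l.length).any
          (fun j => PySem.Str.startswith (PySem.List.pyGetD l j "") (PySem.List.pyGetD l i ""))
        if is_prefix then answer else answer + 1) =
      (fun (answer : Int) (i : Int) =>
        if (!(PySem.List.pyRange (i + 1) l.length).any
          (fun j => PySem.Str.startswith (PySem.List.pyGetD l j "") (PySem.List.pyGetD l i ""))) = true
        then answer + 1 else answer) := by
    funext a i
    cases (PySem.List.pyRange (i + 1) l.length).any
      (fun j => PySem.Str.startswith (PySem.List.pyGetD l j "") (PySem.List.pyGetD l i "")) <;> simp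
  rw [hfun, PySem.List.foldl_count_if, zero_add, ← pv_countP_range_eq l]
  congr 1
  rw [PySem.List.pyRange_zero_nat, List.countP_map]
  apply List.countP_congr
  intro k hk
  simp only [List.mem_range] at hk
  simp only [Function.comp_apply]
  have h2 : (PySem.List.pyRange ((k : Int) + 1) (l.length : Int)).any
      (fun j => PySem.Str.startswith (PySem.List.pyGetD l j "") (PySem.List.pyGetD l (k : Int) "")) =
      (l.drop ((k : Int) + 1).toNat).any
      (fun y => PySem.Str.startswith y (PySem.List.pyGetD l (k : Int) "")) := by
    rw [← PySem.List.map_pyGetD_pyRange' l "" (a := (k : Int) + 1) (by positivity), List.any_map]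
    rfl
  rw [h2, PySem.List.pyGetD_natCast, show ((k : Int) + 1).toNat = k + 1 from by omega]

theorem pv_main (ws : List String) (hs : List.Pairwise (· < ·) ws) :
    (PySem.List.pyRange 0 ws.length).foldl
      (fun answer i =>
        let is_prefix := (PySem.List.pyRange (i + 1) ws.length).any
          (fun j => PySem.Str.startswith (PySem.List.pyGetD ws j "") (PySem.List.pyGetD ws i ""))
        if is_prefix then answer else answer + 1) 0 =
    (if ws.isEmpty then (0 : Int)
     else ((ws.zip ws.tail).countP (fun p => !PySem.Str.startswith p.2 p.1) : Int) + 1) := by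
  rw [pv_A_eq_countFree ws]
  cases ws with
  | nil => simp [pvCountFree]
  | cons x t =>
    rw [pv_countFree_eq_zip _ hs (by simp)]
    simp only [List.isEmpty_cons, Bool.false_eq_true, if_false]
    push_cast
    ring

-- ===== VERDICT (by name: the statement is the Claim_ definition above) =====
theorem max_prefix_free_subset_spec : Claim_equal_max_prefix_free_subset := by
  intro words _
  unfold Spec_max_prefix_free_subset max_prefix_free_subset max_prefix_free_subset_alt
  exact pv_main _ (PySem.List.sorted_ofList_pairwise_lt words)
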